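-- pv_equiv track=rewrite | github.com/ikaushikpal/DS-450-python | Dynamic Programming/Highway Billboard Problem.py | highwayBillboard
-- ===== SOURCE A (Python) =====
-- def highwayBillboard(total_length, places, revenue, min_dist):
--     n = len(revenue)
--
--     dp = [[0]*(1+total_length) for _ in range(1+n)]
--
--     for i in range(1, n+1):
--         for j in range(1, total_length+1):
--             if places[i-1] <= j:
--
--                 if j < min_dist+1:
--                     dp[i][j] = max(dp[i-1][j], revenue[i-1])
--
--                 else:
--                     dp[i][j] = max(dp[i-1][j], dp[i-1][j-min_dist-1]+revenue[i-1])
--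
--             else:
--                 dp[i][j] = dp[i-1][j]
--
--     return dp[n][total_length]
-- ===== SOURCE B (Python) =====
-- def highwayBillboard(total_length, places, revenue, min_dist):
--     step = min_dist + 1
--     budgets = []
--     j = total_length
--     while j >= 1:
--         budgets.append(j)
--         j -= step
--     m = len(budgets)
--     dp = [0] * m
--     for p, r in zip(places, revenue):
--         dp = [max(dp[k], (dp[k + 1] if k + 1 < m else 0) + r)
--               if p <= budgets[k] else dp[k]
--               for k in range(m)]
--     return dp[0] if m > 0 else 0
-- ===== Notes on version B (the rewrite author's own statement) =====
-- stated objective: faster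
-- what changed: Instead of filling the full (n+1)x(total_length+1) DP table, B precomputes the O(total_length/(min_dist+1)) budget columns actually reachable from total_length in steps of min_dist+1 and runs the same recurrence only on those columns, one row vector at a time.
-- outside the precondition, e.g. on highwayBillboard(1, [5], [3], -2): A returns 0, B does not finish within the time limit; on highwayBillboard(1, [1], [3], -1): A returns 3, B does not finish within the time limit
import Mathlib
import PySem

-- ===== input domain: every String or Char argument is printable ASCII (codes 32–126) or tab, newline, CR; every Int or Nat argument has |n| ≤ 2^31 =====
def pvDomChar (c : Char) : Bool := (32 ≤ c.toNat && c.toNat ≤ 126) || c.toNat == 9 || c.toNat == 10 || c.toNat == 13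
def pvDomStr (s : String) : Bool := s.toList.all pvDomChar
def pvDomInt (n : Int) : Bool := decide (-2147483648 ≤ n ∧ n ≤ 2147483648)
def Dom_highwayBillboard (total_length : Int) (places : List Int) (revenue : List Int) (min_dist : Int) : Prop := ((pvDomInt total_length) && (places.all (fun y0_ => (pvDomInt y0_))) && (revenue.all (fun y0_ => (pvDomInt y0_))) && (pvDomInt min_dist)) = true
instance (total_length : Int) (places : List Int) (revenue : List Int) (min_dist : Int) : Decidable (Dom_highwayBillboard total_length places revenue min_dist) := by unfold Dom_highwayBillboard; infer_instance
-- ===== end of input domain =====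

-- B replaces A's full (n+1)×(total_length+1) DP table by the O(total_length/(min_dist+1))
-- budget columns reachable from total_length in steps of min_dist+1 (same recurrence): faster.

-- ===== PORT A =====
-- rows are ported as Array Int (a Python list is an array; updates stay in place);
-- loop indices j from pyRange are ≥ 1 and the index j-min_dist-1 is ≥ 0 in the branch
-- that reads it, so .toNat is exact there; the final index is exact under Pre_ (0 ≤ total_length).
def highwayBillboard (total_length : Int) (places : List Int) (revenue : List Int) (min_dist : Int) : Int :=
  let n : Int := (revenue.length : Int)
  let dp0 : List (Array Int) :=
    List.replicate (1 + n).toNat (Array.replicate (1 + total_length).toNat 0)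
  let dp := (PySem.List.pyRange 1 (n + 1) 1).foldl (fun dp i =>
    PySem.List.pySetD dp i
      ((PySem.List.pyRange 1 (total_length + 1) 1).foldl (fun row j =>
        let v : Int :=
          if PySem.List.pyGetD places (i - 1) 0 ≤ j then
            if j < min_dist + 1 then
              max ((PySem.List.pyGetD dp (i - 1) #[]).getD j.toNat 0)
                  (PySem.List.pyGetD revenue (i - 1) 0)
            else
              max ((PySem.List.pyGetD dp (i - 1) #[]).getD j.toNat 0)
                  ((PySem.List.pyGetD dp (i - 1) #[]).getD (j - min_dist - 1).toNat 0
                    + PySem.List.pyGetD revenue (i - 1) 0)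
          else (PySem.List.pyGetD dp (i - 1) #[]).getD j.toNat 0
        row.setIfInBounds j.toNat v)
      (PySem.List.pyGetD dp i #[]))) dp0
  (PySem.List.pyGetD dp n #[]).getD total_length.toNat 0

-- ===== PORT B =====
-- the 'while j >= 1: budgets.append(j); j -= step' loop; '1 ≤ step' is a termination guard
-- only (the Python loop is entered with step = min_dist+1 ≥ 1 under Pre_).
def mkBudgets (bud : Array Int) (j : Int) (step : Int) : Array Int :=
  if h : 1 ≤ j ∧ 1 ≤ step then mkBudgets (bud.push j) (j - step) step
  else bud
termination_by j.toNat
decreasing_by omega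

def highwayBillboard_alt (total_length : Int) (places : List Int) (revenue : List Int) (min_dist : Int) : Int :=
  let step := min_dist + 1
  let budgets : Array Int := mkBudgets #[] total_length step
  let m := budgets.size
  let dp : Array Int := Array.replicate m 0
  let dp := (places.zip revenue).foldl (fun dp pr =>
    ((List.range m).map (fun k =>
      if pr.1 ≤ budgets.getD k 0 then
        max (dp.getD k 0) ((if k + 1 < m then dp.getD (k + 1) 0 else 0) + pr.2)
      else dp.getD k 0)).toArray) dp
  if 0 < m then dp.getD 0 0 else 0

-- ===== PRECONDITION & SPEC =====
-- Pre_ excludes: negative total_length (A raises IndexError on dp[n][total_length]); with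
-- total_length ≥ 1, places shorter than revenue (A raises IndexError on places[i-1]) and
-- negative min_dist (A raises IndexError reading dp[i-1][j-min_dist-1] on most such inputs,
-- and B's budget while-loop does not terminate there, so no value could be matched).
def Pre_highwayBillboard (total_length : Int) (places : List Int) (revenue : List Int) (min_dist : Int) : Prop :=
  0 ≤ total_length ∧ (total_length = 0 ∨ (0 ≤ min_dist ∧ revenue.length ≤ places.length))
instance (total_length : Int) (places : List Int) (revenue : List Int) (min_dist : Int) : Decidable (Pre_highwayBillboard total_length places revenue min_dist) := by unfold Pre_highwayBillboard; infer_instance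

def pvWitness_highwayBillboard : Int × List Int × List Int × Int := (10, [2, 5, 8], [6, 7, 8], 2)

def Spec_highwayBillboard (total_length : Int) (places : List Int) (revenue : List Int) (min_dist : Int) (out : Int) : Prop := out = highwayBillboard_alt total_length places revenue min_dist
instance (total_length : Int) (places : List Int) (revenue : List Int) (min_dist : Int) (out : Int) : Decidable (Spec_highwayBillboard total_length places revenue min_dist out) := by unfold Spec_highwayBillboard; infer_instance

-- ===== CLAIM (what is proved, stated in full; the proofs are below) =====
def Claim_equal_highwayBillboard : Prop := ∀ (total_length : Int) (places : List Int) (revenue : List Int) (min_dist : Int), Dom_highwayBillboard total_length places revenue min_dist → Pre_highwayBillboard total_length places revenue min_dist → Spec_highwayBillboard total_length places revenue min_dist (highwayBillboard total_length places revenue min_dist)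

-- ===== LEMMAS AND PROOFS =====

-- The mathematical recurrence both programs compute: fSpec i j = dp[i][j] of A
-- (extended by fSpec i j = 0 for j ≤ 0).
def fSpec (places revenue : List Int) (d : Int) : Nat → Int → Int
  | 0, _ => 0
  | i + 1, j =>
    if j ≤ 0 then 0
    else if places.getD i 0 ≤ j then
      max (fSpec places revenue d i j) (fSpec places revenue d i (j - d - 1) + revenue.getD i 0)
    else fSpec places revenue d i j

theorem fSpec_nonpos (places revenue : List Int) (d : Int) (i : Nat) (j : Int) (hj : j ≤ 0) :
    fSpec places revenue d i j = 0 := by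
  cases i <;> simp [fSpec, hj]

-- list form of the budgets loop, used only in the proofs
def mkBudgetsList (j : Int) (step : Int) : List Int :=
  if h : 1 ≤ j ∧ 1 ≤ step then j :: mkBudgetsList (j - step) step
  else []
termination_by j.toNat
decreasing_by omega

theorem mkBudgets_toList (bud : Array Int) (j step : Int) :
    (mkBudgets bud j step).toList = bud.toList ++ mkBudgetsList j step := by
  rw [mkBudgets, mkBudgetsList]
  by_cases h : 1 ≤ j ∧ 1 ≤ step
  · rw [dif_pos h, dif_pos h, mkBudgets_toList (bud.push j) (j - step) step]
    simp
  · rw [dif_neg h, dif_neg h]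
    simp
termination_by j.toNat
decreasing_by omega

theorem mkBudgets_eq_toArray (j step : Int) :
    mkBudgets #[] j step = (mkBudgetsList j step).toArray := by
  have h := mkBudgets_toList #[] j step
  simp at h
  exact Array.toList_inj.mp (by simpa using h)

theorem mkBudgets_lt_length (j step : Int) (hs : 1 ≤ step) (k : Nat) :
    k < (mkBudgetsList j step).length ↔ 1 ≤ j - k * step := by
  induction k generalizing j with
  | zero =>
    rw [mkBudgetsList]
    by_cases hj : 1 ≤ j
    · simp only [hj, hs, and_self, dite_true, List.length_cons]
      norm_num [hj]
    · simp only [hj, hs, false_and, dite_false, List.length_nil]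
      norm_num [hj]
  | succ k ih =>
    rw [mkBudgetsList]
    by_cases hj : 1 ≤ j
    · have harith : (j - step) - (k : Int) * step = j - ((k : Nat) + 1 : Nat) * step := by
        push_cast; ring
      simp only [hj, hs, and_self, dite_true, List.length_cons]
      rw [Nat.succ_lt_succ_iff, ih, harith]
    · have hk1 : (1 : Int) ≤ ((k : Int) + 1) * step := by nlinarith [Int.natCast_nonneg k]
      have hnle : ¬ (1 ≤ j - ((k : Nat) + 1 : Nat) * step) := by push_cast; nlinarith
      simp only [hj, false_and, dite_false, List.length_nil, hnle, iff_false]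
      omega

theorem mkBudgets_getD (j step : Int) (hs : 1 ≤ step) (k : Nat) (hk : 1 ≤ j - k * step) :
    (mkBudgetsList j step).getD k 0 = j - k * step := by
  induction k generalizing j with
  | zero =>
    have hj : 1 ≤ j := by push_cast at hk; omega
    rw [mkBudgetsList]; simp [hj, hs]
  | succ k ih =>
    have hk1 : (1 : Int) ≤ ((k : Int) + 1) * step := by nlinarith [Int.natCast_nonneg k]
    have hj : 1 ≤ j := by push_cast at hk ⊢; nlinarith
    have hk' : 1 ≤ (j - step) - (k : Int) * step := by push_cast at hk; push_cast; linarith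
    rw [mkBudgetsList]
    simp only [hj, hs, and_self, dite_true, List.getD_cons_succ]
    rw [ih (j - step) hk']
    push_cast; ring

theorem getD_set_self {α : Type} (l : List α) (k : Nat) (v d : α) (h : k < l.length) :
    (l.set k v).getD k d = v := by
  simp [List.getD_eq_getElem?_getD, h]

theorem getD_set_ne {α : Type} (l : List α) (k m : Nat) (v d : α) (h : k ≠ m) :
    (l.set k v).getD m d = l.getD m d := by
  simp [List.getD_eq_getElem?_getD, List.getElem?_set, h]

theorem getD_replicate' {α : Type} (n k : Nat) (x d : α) (h : k < n) :
    (List.replicate n x).getD k d = x := by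
  simp [List.getD_eq_getElem?_getD, h]

theorem arr_getD_toArray {α : Type} (xs : List α) (k : Nat) (d : α) :
    (xs.toArray).getD k d = xs.getD k d := by
  by_cases h : k < xs.length
  · simp [Array.getD, h, List.getD_eq_getElem?_getD, List.getElem?_eq_getElem h]
  · simp [Array.getD, h, List.getD_eq_getElem?_getD,
      List.getElem?_eq_none (by omega : xs.length ≤ k)]

theorem arr_set_toArray {α : Type} (xs : List α) (i : Nat) (v : α) :
    (xs.toArray).setIfInBounds i v = (xs.set i v).toArray := by
  simp

theorem arr_replicate {α : Type} (n : Nat) (x : α) :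
    Array.replicate n x = (List.replicate n x).toArray := by
  simp

theorem foldB (L : Int) (places revenue : List Int) (d : Int)
    (bs : List Int)
    (hb : ∀ k : Nat, k < bs.length → bs.getD k 0 = L - k * (d + 1))
    (hpos : ∀ k : Nat, k < bs.length → 1 ≤ L - k * (d + 1))
    (hm : L - bs.length * (d + 1) ≤ 0)
    (hlen : revenue.length ≤ places.length) :
    ∀ (rs : List Int) (i : Nat) (ps : List Int),
      ps = List.drop i places → rs = List.drop i revenue → i ≤ revenue.length →
      ∀ dp : Array Int,
        (∀ k : Nat, k < bs.length → dp.getD k 0 = fSpec places revenue d i (L - k * (d + 1))) →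
        ∀ k : Nat, k < bs.length →
          ((ps.zip rs).foldl
            (fun dp pr =>
              ((List.range bs.toArray.size).map (fun k =>
                if pr.1 ≤ bs.toArray.getD k 0 then
                  max (dp.getD k 0)
                    ((if k + 1 < bs.toArray.size then dp.getD (k + 1) 0 else 0) + pr.2)
                else dp.getD k 0)).toArray) dp).getD k 0
            = fSpec places revenue d revenue.length (L - k * (d + 1)) := by
  intro rs
  induction rs with
  | nil =>
    intro i ps hps hrs hi dp hdp k hk
    have hlen' : revenue.length ≤ i := by
      by_contra hlt
      push_neg at hlt
      rw [List.drop_eq_getElem_cons hlt] at hrs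
      simp at hrs
      omega
    have hieq : i = revenue.length := le_antisymm hi hlen'
    simp only [List.zip_nil_right, List.foldl_nil]
    rw [hdp k hk, hieq]
  | cons r rs' ih =>
    intro i ps hps hrs hi dp hdp k hk
    have hilt : i < revenue.length := by
      by_contra hge
      push_neg at hge
      rw [List.drop_eq_nil_of_le hge] at hrs
      simp at hrs
    have hilt' : i < places.length := lt_of_lt_of_le hilt hlen
    rw [List.drop_eq_getElem_cons hilt] at hrs
    rw [List.drop_eq_getElem_cons hilt'] at hps
    injection hrs with hr hrs'
    subst hps hr
    simp only [List.zip_cons_cons, List.foldl_cons]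
    refine ih (i + 1) (List.drop (i+1) places) rfl hrs' hilt _ ?_ k hk
    intro k' hk'
    rw [arr_getD_toArray, PySem.List.getD_map_range _ _ _ _ (by simpa using hk')]
    simp only [List.size_toArray, arr_getD_toArray]
    have hbk : bs.getD k' 0 = L - k' * (d + 1) := hb k' hk'
    have hbkpos : 1 ≤ L - k' * (d + 1) := hpos k' hk'
    have hplace : places.getD i 0 = places[i] := by
      simp [List.getD_eq_getElem?_getD, hilt']
    have hrev : revenue.getD i 0 = revenue[i] := by
      simp [List.getD_eq_getElem?_getD, hilt]
    have hnext : (if k' + 1 < bs.length then dp.getD (k' + 1) 0 else 0)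
        = fSpec places revenue d i (L - k' * (d + 1) - d - 1) := by
      have harith : L - ((k' : Nat) + 1 : Nat) * (d + 1) = L - k' * (d + 1) - d - 1 := by
        push_cast; ring
      by_cases hlt : k' + 1 < bs.length
      · rw [if_pos hlt, hdp (k' + 1) hlt, harith]
      · rw [if_neg hlt]
        push_neg at hlt
        have : L - ((k' : Nat) + 1 : Nat) * (d + 1) ≤ 0 := by
          have h1 : bs.length ≤ k' + 1 := hlt
          have h2 : (bs.length : Int) * (d + 1) ≤ ((k' : Nat) + 1 : Nat) * (d + 1) := by
            have hd1 : (0 : Int) ≤ d + 1 := by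
              by_contra hneg
              push_neg at hneg
              nlinarith [hpos 0 (by omega : 0 < bs.length), Int.natCast_nonneg k']
            exact mul_le_mul_of_nonneg_right (by exact_mod_cast h1) hd1
          linarith
        rw [← harith]
        exact (fSpec_nonpos places revenue d i _ this).symm
    rw [hbk, hnext, hdp k' hk']
    rw [show fSpec places revenue d (i + 1) (L - k' * (d + 1))
        = if L - k' * (d + 1) ≤ 0 then 0
          else if places.getD i 0 ≤ L - k' * (d + 1) then
            max (fSpec places revenue d i (L - k' * (d + 1)))
              (fSpec places revenue d i (L - k' * (d + 1) - d - 1) + revenue.getD i 0)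
          else fSpec places revenue d i (L - k' * (d + 1))
          from by rw [fSpec]]
    rw [hplace, hrev, if_neg (show ¬(L - (k' : Int) * (d + 1) ≤ 0) from by linarith)]

theorem alt_eq_fSpec (total_length : Int) (places revenue : List Int) (min_dist : Int)
    (hp : Pre_highwayBillboard total_length places revenue min_dist) :
    highwayBillboard_alt total_length places revenue min_dist
      = fSpec places revenue min_dist revenue.length total_length := by
  obtain ⟨hL, hrest⟩ := hp
  by_cases hL0 : total_length = 0
  · subst hL0
    have hnil : mkBudgets #[] 0 (min_dist + 1) = #[] := by
      rw [mkBudgets]; simp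
    simp [highwayBillboard_alt, hnil, fSpec_nonpos]
  · have hL1 : 1 ≤ total_length := by omega
    obtain ⟨hd, hlen⟩ : 0 ≤ min_dist ∧ revenue.length ≤ places.length := by
      rcases hrest with h | h
      · exact absurd h hL0
      · exact h
    have hs : (1 : Int) ≤ min_dist + 1 := by omega
    set bs := mkBudgetsList total_length (min_dist + 1) with hbs
    have hpos : ∀ k : Nat, k < bs.length → 1 ≤ total_length - k * (min_dist + 1) := by
      intro k hk
      exact (mkBudgets_lt_length total_length (min_dist + 1) hs k).mp hk
    have hb : ∀ k : Nat, k < bs.length → bs.getD k 0 = total_length - k * (min_dist + 1) := by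
      intro k hk
      exact mkBudgets_getD total_length (min_dist + 1) hs k (hpos k hk)
    have hm : total_length - bs.length * (min_dist + 1) ≤ 0 := by
      by_contra hc
      push_neg at hc
      have h1 := Int.add_one_le_of_lt hc
      rw [zero_add] at h1
      have h2 := (mkBudgets_lt_length total_length (min_dist + 1) hs bs.length).mpr h1
      rw [← hbs] at h2
      omega
    have hmpos : 0 < bs.length := by
      rw [mkBudgets_lt_length total_length (min_dist + 1) hs 0,
        show ((0 : Nat) : Int) * (min_dist + 1) = 0 from by push_cast; ring]
      omega
    have hinit : ∀ k : Nat, k < bs.length →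
        (Array.replicate bs.toArray.size (0 : Int)).getD k 0
          = fSpec places revenue min_dist 0 (total_length - k * (min_dist + 1)) := by
      intro k hk
      rw [arr_replicate, arr_getD_toArray, getD_replicate' _ _ _ _ (by simpa using hk)]
      rfl
    have hfold := foldB total_length places revenue min_dist bs hb hpos hm hlen
      revenue 0 places (by simp) (by simp) (by omega)
      (Array.replicate bs.toArray.size 0) hinit 0 hmpos
    simp only [highwayBillboard_alt]
    rw [mkBudgets_eq_toArray total_length (min_dist + 1)]
    rw [← hbs, if_pos (show 0 < bs.toArray.size from by simpa using hmpos)]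
    have : total_length - (0 : Nat) * (min_dist + 1) = total_length := by push_cast; ring
    rw [this] at hfold
    exact hfold

-- ----- A side -----

def rowSpec (L : Int) (places revenue : List Int) (d : Int) (ir : Nat) : List Int :=
  (List.range (1 + L).toNat).map (fun jn : Nat => fSpec places revenue d ir (jn : Int))

def partRow (L : Int) (places revenue : List Int) (d : Int) (ir t : Nat) : List Int :=
  (List.range (1 + L).toNat).map
    (fun jn : Nat => if jn ≤ t then fSpec places revenue d ir (jn : Int) else 0)

theorem rowSpec_zero (L : Int) (places revenue : List Int) (d : Int) :
    rowSpec L places revenue d 0 = List.replicate (1 + L).toNat 0 := by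
  unfold rowSpec
  apply List.ext_getElem (by simp)
  intro n h1 h2
  simp [fSpec]

theorem partRow_zero (L : Int) (places revenue : List Int) (d : Int) (ir : Nat) :
    partRow L places revenue d ir 0 = List.replicate (1 + L).toNat 0 := by
  unfold partRow
  apply List.ext_getElem (by simp)
  intro n h1 h2
  simp only [List.getElem_map, List.getElem_range, List.getElem_replicate]
  by_cases hn : n ≤ 0
  · have : n = 0 := by omega
    subst this
    rw [if_pos le_rfl]
    exact fSpec_nonpos places revenue d ir 0 le_rfl
  · rw [if_neg hn]

theorem partRow_last (L : Int) (hL : 0 ≤ L) (places revenue : List Int) (d : Int) (ir : Nat) :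
    partRow L places revenue d ir L.toNat = rowSpec L places revenue d ir := by
  unfold partRow rowSpec
  apply List.map_congr_left
  intro jn hjn
  rw [List.mem_range] at hjn
  rw [if_pos (by omega)]

theorem partRow_set (L : Int) (places revenue : List Int) (d : Int) (ir t : Nat)
    (h : t + 1 < (1 + L).toNat) :
    (partRow L places revenue d ir t).set (t + 1)
        (fSpec places revenue d ir ((t + 1 : Nat) : Int))
      = partRow L places revenue d ir (t + 1) := by
  unfold partRow
  apply List.ext_getElem (by simp)
  intro n h1 h2
  rw [List.getElem_set]
  simp only [List.getElem_map, List.getElem_range]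
  by_cases hn : t + 1 = n
  · subst hn
    rw [if_pos rfl, if_pos le_rfl]
  · rw [if_neg hn]
    have : (n ≤ t) ↔ (n ≤ t + 1) := by
      simp only [List.length_set, List.length_map, List.length_range] at h1
      omega
    rw [if_congr this rfl rfl]

theorem innerA (L : Int) (hL : 0 ≤ L) (places revenue : List Int) (d : Int)
    (hd : 0 ≤ d ∨ L ≤ 0)
    (ik : Nat) (iI : Int) (hiI : iI = (ik : Int) + 1)
    (prev : Array Int) (hprev : prev = (rowSpec L places revenue d ik).toArray) :
    ∀ (c t : Nat) (a : Int), a = 1 + (t : Int) → t + c = L.toNat →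
      (PySem.List.pyRange a (L + 1) 1).foldl
        (fun row j =>
          let v : Int :=
            if PySem.List.pyGetD places (iI - 1) 0 ≤ j then
              if j < d + 1 then
                max (prev.getD j.toNat 0) (PySem.List.pyGetD revenue (iI - 1) 0)
              else
                max (prev.getD j.toNat 0)
                    (prev.getD (j - d - 1).toNat 0 + PySem.List.pyGetD revenue (iI - 1) 0)
            else prev.getD j.toNat 0
          row.setIfInBounds j.toNat v)
        ((partRow L places revenue d (ik + 1) t).toArray)
      = (rowSpec L places revenue d (ik + 1)).toArray := by
  subst hprev
  intro c
  induction c with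
  | zero =>
    intro t a ha ht
    subst ha
    rw [PySem.List.pyRange_one_eq_nil (by omega), List.foldl_nil]
    have htL : t = L.toNat := by omega
    subst htL
    rw [partRow_last L hL places revenue d (ik + 1)]
  | succ c ih =>
    intro t a ha ht
    subst ha
    have hd' : 0 ≤ d := by
      rcases hd with h | h
      · exact h
      · omega
    rw [PySem.List.pyRange_one_cons (by omega), List.foldl_cons]
    simp only []
    have hiI1 : iI - 1 = ((ik : Nat) : Int) := by push_cast; omega
    have hidx : (1 : Int) + (t : Int) = ((t + 1 : Nat) : Int) := by push_cast; ring
    have htn : ((1 : Int) + (t : Int)).toNat = t + 1 := by omega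
    have hlt1 : t + 1 < (1 + L).toNat := by omega
    have hval :
        (if PySem.List.pyGetD places (iI - 1) 0 ≤ 1 + (t : Int) then
          if 1 + (t : Int) < d + 1 then
            max ((rowSpec L places revenue d ik).toArray.getD ((1 + (t : Int)).toNat) 0)
                (PySem.List.pyGetD revenue (iI - 1) 0)
          else
            max ((rowSpec L places revenue d ik).toArray.getD ((1 + (t : Int)).toNat) 0)
                ((rowSpec L places revenue d ik).toArray.getD ((1 + (t : Int) - d - 1).toNat) 0
                  + PySem.List.pyGetD revenue (iI - 1) 0)
        else (rowSpec L places revenue d ik).toArray.getD ((1 + (t : Int)).toNat) 0)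
        = fSpec places revenue d (ik + 1) ((t + 1 : Nat) : Int) := by
      simp only [hiI1, PySem.List.pyGetD_natCast, htn, arr_getD_toArray]
      have hget : (rowSpec L places revenue d ik).getD (t + 1) 0
          = fSpec places revenue d ik ((t + 1 : Nat) : Int) := by
        unfold rowSpec
        rw [PySem.List.getD_map_range _ _ _ _ hlt1]
      rw [hget, hidx]
      conv_rhs => rw [fSpec]
      rw [if_neg (show ¬(((t + 1 : Nat) : Int) ≤ 0) from by push_cast; omega)]
      by_cases hcond : places.getD ik 0 ≤ ((t + 1 : Nat) : Int)
      · rw [if_pos hcond, if_pos hcond]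
        by_cases hsmall : ((t + 1 : Nat) : Int) < d + 1
        · rw [if_pos hsmall,
            fSpec_nonpos places revenue d ik (((t + 1 : Nat) : Int) - d - 1) (by push_cast; omega),
            zero_add]
        · rw [if_neg hsmall]
          have harg : (rowSpec L places revenue d ik).getD
              ((((t + 1 : Nat) : Int) - d - 1).toNat) 0
              = fSpec places revenue d ik (((t + 1 : Nat) : Int) - d - 1) := by
            unfold rowSpec
            rw [PySem.List.getD_map_range _ _ _ _ (by push_cast; omega)]
            congr 1
            push_cast; omega
          rw [harg]
      · rw [if_neg hcond, if_neg hcond]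
    rw [hval, htn, arr_set_toArray, partRow_set L places revenue d (ik + 1) t hlt1]
    exact ih (t + 1) (1 + (t : Int) + 1) (by push_cast; ring) (by omega)

theorem outerA_step (L : Int) (hL : 0 ≤ L) (places revenue : List Int) (d : Int)
    (hd : 0 ≤ d ∨ L ≤ 0) (c : Nat) (hc : c + 1 ≤ revenue.length)
    (Fc : List (Array Int))
    (h1 : Fc.length = revenue.length + 1)
    (h2 : ∀ ii : Nat, ii ≤ c → Fc.getD ii #[] = (rowSpec L places revenue d ii).toArray)
    (h3 : ∀ ii : Nat, c < ii → ii ≤ revenue.length →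
      Fc.getD ii #[] = Array.replicate (1 + L).toNat 0) :
    ∀ F : List (Array Int),
      F = PySem.List.pySetD Fc (1 + (c : Int))
        ((PySem.List.pyRange 1 (L + 1) 1).foldl (fun row j =>
          let v : Int :=
            if PySem.List.pyGetD places (1 + (c : Int) - 1) 0 ≤ j then
              if j < d + 1 then
                max ((PySem.List.pyGetD Fc (1 + (c : Int) - 1) #[]).getD j.toNat 0)
                    (PySem.List.pyGetD revenue (1 + (c : Int) - 1) 0)
              else
                max ((PySem.List.pyGetD Fc (1 + (c : Int) - 1) #[]).getD j.toNat 0)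
                    ((PySem.List.pyGetD Fc (1 + (c : Int) - 1) #[]).getD (j - d - 1).toNat 0
                      + PySem.List.pyGetD revenue (1 + (c : Int) - 1) 0)
            else (PySem.List.pyGetD Fc (1 + (c : Int) - 1) #[]).getD j.toNat 0
          row.setIfInBounds j.toNat v)
        (PySem.List.pyGetD Fc (1 + (c : Int)) #[])) →
      F.length = revenue.length + 1 ∧
      (∀ ii : Nat, ii ≤ c + 1 → F.getD ii #[] = (rowSpec L places revenue d ii).toArray) ∧
      (∀ ii : Nat, c + 1 < ii → ii ≤ revenue.length →
        F.getD ii #[] = Array.replicate (1 + L).toNat 0) := by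
  intro F hF
  have hprevterm : PySem.List.pyGetD Fc (1 + (c : Int) - 1) #[]
      = (rowSpec L places revenue d c).toArray := by
    rw [show (1 : Int) + (c : Int) - 1 = ((c : Nat) : Int) from by push_cast; ring,
      PySem.List.pyGetD_natCast]
    exact h2 c le_rfl
  have hinit : PySem.List.pyGetD Fc (1 + (c : Int)) #[]
      = (partRow L places revenue d (c + 1) 0).toArray := by
    rw [show (1 : Int) + (c : Int) = ((c + 1 : Nat) : Int) from by push_cast; ring,
      PySem.List.pyGetD_natCast, h3 (c + 1) (by omega) (by omega), partRow_zero,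
      arr_replicate]
  rw [hprevterm, hinit] at hF
  rw [innerA L hL places revenue d hd c (1 + (c : Int)) (by push_cast; ring)
    ((rowSpec L places revenue d c).toArray) rfl
    L.toNat 0 1 (by norm_num) (by omega)] at hF
  rw [show (1 : Int) + (c : Int) = ((c + 1 : Nat) : Int) from by push_cast; ring,
    PySem.List.pySetD_natCast] at hF
  subst hF
  refine ⟨by simpa using h1, ?_, ?_⟩
  · intro ii hii
    by_cases hii2 : ii = c + 1
    · subst hii2
      rw [getD_set_self _ _ _ _ (by omega)]
    · rw [getD_set_ne _ _ _ _ _ (by omega)]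
      exact h2 ii (by omega)
  · intro ii hii hii2
    rw [getD_set_ne _ _ _ _ _ (by omega)]
    exact h3 ii (by omega) hii2

theorem outerA (L : Int) (hL : 0 ≤ L) (places revenue : List Int) (d : Int)
    (hd : 0 ≤ d ∨ L ≤ 0) :
    ∀ c : Nat, c ≤ revenue.length →
    ∀ F : List (Array Int),
      F = ((List.range c).map (fun k : Nat => (1 : Int) + (k : Int))).foldl
        (fun dp i =>
          PySem.List.pySetD dp i
            ((PySem.List.pyRange 1 (L + 1) 1).foldl (fun row j =>
              let v : Int :=
                if PySem.List.pyGetD places (i - 1) 0 ≤ j then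
                  if j < d + 1 then
                    max ((PySem.List.pyGetD dp (i - 1) #[]).getD j.toNat 0)
                        (PySem.List.pyGetD revenue (i - 1) 0)
                  else
                    max ((PySem.List.pyGetD dp (i - 1) #[]).getD j.toNat 0)
                        ((PySem.List.pyGetD dp (i - 1) #[]).getD (j - d - 1).toNat 0
                          + PySem.List.pyGetD revenue (i - 1) 0)
                else (PySem.List.pyGetD dp (i - 1) #[]).getD j.toNat 0
              row.setIfInBounds j.toNat v)
            (PySem.List.pyGetD dp i #[])))
        (List.replicate (revenue.length + 1) (Array.replicate (1 + L).toNat 0)) →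
      F.length = revenue.length + 1 ∧
      (∀ ii : Nat, ii ≤ c → F.getD ii #[] = (rowSpec L places revenue d ii).toArray) ∧
      (∀ ii : Nat, c < ii → ii ≤ revenue.length →
        F.getD ii #[] = Array.replicate (1 + L).toNat 0) := by
  intro c
  induction c with
  | zero =>
    intro hc F hF
    simp only [List.range_zero, List.map_nil, List.foldl_nil] at hF
    subst hF
    refine ⟨by simp, ?_, ?_⟩
    · intro ii hii
      have : ii = 0 := by omega
      subst this
      rw [getD_replicate' _ _ _ _ (by omega), rowSpec_zero, arr_replicate]
    · intro ii _ hii2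
      rw [getD_replicate' _ _ _ _ (by omega)]
  | succ c ih =>
    intro hc F hF
    rw [List.range_succ, List.map_append, List.foldl_append] at hF
    simp only [List.map_cons, List.map_nil, List.foldl_cons, List.foldl_nil] at hF
    obtain ⟨h1, h2, h3⟩ := ih (by omega) _ rfl
    exact outerA_step L hL places revenue d hd c hc _ h1 h2 h3 F hF

theorem highwayBillboard_eq_fSpec (total_length : Int) (places revenue : List Int) (min_dist : Int)
    (hp : Pre_highwayBillboard total_length places revenue min_dist) :
    highwayBillboard total_length places revenue min_dist
      = fSpec places revenue min_dist revenue.length total_length := by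
  obtain ⟨hL, hrest⟩ := hp
  have hd : 0 ≤ min_dist ∨ total_length ≤ 0 := by
    rcases hrest with h | h
    · right; omega
    · left; exact h.1
  simp only [highwayBillboard]
  rw [PySem.List.pyRange_one 1 ((revenue.length : Int) + 1)]
  rw [show (((revenue.length : Int) + 1) - 1).toNat = revenue.length from by omega]
  rw [show ((1 : Int) + (revenue.length : Int)).toNat = revenue.length + 1 from by omega]
  obtain ⟨h1, h2, _⟩ := outerA total_length hL places revenue min_dist hd
    revenue.length le_rfl _ rfl
  rw [PySem.List.pyGetD_natCast, h2 revenue.length le_rfl, arr_getD_toArray]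
  unfold rowSpec
  rw [PySem.List.getD_map_range _ _ _ _ (by omega)]
  congr 1
  omega

-- ===== VERDICT (by name: the statement is the Claim_ definition above) =====
theorem highwayBillboard_spec : Claim_equal_highwayBillboard := by
  intro L places revenue d _ hp
  unfold Spec_highwayBillboard
  rw [highwayBillboard_eq_fSpec L places revenue d hp, alt_eq_fSpec L places revenue d hp]
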